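-- pv_equiv track=rewrite | github.com/Fabricioosm/lista-exercicio-python | Exercicio-Lab/python/lista10.py | mult_lista
-- ===== SOURCE A (Python) =====
-- def mult_lista(num1, num2):
--     indice = 0
--     mult = 0
--     nova_lista = []
--
--     while indice < len(num1) or indice < len(num2):
--         if indice >= len(num2):
--             nova_lista.append(num1[indice])
--         elif indice >= len(num1):
--             nova_lista.append(num2[indice])
--         else:
--             lista1 = num1[indice]
--             lista2 = num2[indice]
--             mult = lista1 * lista2
--             nova_lista.append(mult)
--         indice += 1
--     return nova_lista
-- ===== SOURCE B (Python) =====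
-- def mult_lista(num1, num2):
--     n = max(len(num1), len(num2))
--     p1 = num1 + [1] * (n - len(num1))
--     p2 = num2 + [1] * (n - len(num2))
--     return [a * b for a, b in zip(p1, p2)]
-- ===== Notes on version B (the rewrite author's own statement) =====
-- stated objective: alternative
-- what changed: Instead of a max-length index loop with three-way branching, B pads the shorter list with the multiplicative identity 1 to equal length and then takes one uniform elementwise product (zip comprehension), so the leftover tail reappears unchanged via x*1 with no branches or tail concatenation.
import Mathlib
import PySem

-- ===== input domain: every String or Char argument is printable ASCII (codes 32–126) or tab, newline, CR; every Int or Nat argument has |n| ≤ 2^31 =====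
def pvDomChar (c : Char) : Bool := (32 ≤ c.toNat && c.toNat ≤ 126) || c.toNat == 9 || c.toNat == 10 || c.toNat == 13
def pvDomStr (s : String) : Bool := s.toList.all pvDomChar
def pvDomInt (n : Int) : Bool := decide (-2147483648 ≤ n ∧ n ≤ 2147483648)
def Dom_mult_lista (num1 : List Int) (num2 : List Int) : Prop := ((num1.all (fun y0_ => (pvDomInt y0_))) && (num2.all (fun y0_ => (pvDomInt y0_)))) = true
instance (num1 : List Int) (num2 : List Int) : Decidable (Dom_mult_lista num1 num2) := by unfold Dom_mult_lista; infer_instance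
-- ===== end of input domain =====

-- B pads the shorter list with the multiplicative identity 1 and takes one
-- uniform elementwise product, replacing A's branching index loop (alternative).


-- ===== PORT A =====
-- A's while loop over 'indice' with the same three branches; indexing is always
-- in range here, so getD is exact.
def mult_lista_go (num1 : List Int) (num2 : List Int) (i : Nat) : List Int :=
  if _h : i < num1.length ∨ i < num2.length then
    (if num2.length ≤ i then [num1.getD i 0]
     else if num1.length ≤ i then [num2.getD i 0]
     else [num1.getD i 0 * num2.getD i 0]) ++ mult_lista_go num1 num2 (i + 1)
  else []
termination_by num1.length + num2.length - i
decreasing_by omega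

def mult_lista (num1 : List Int) (num2 : List Int) : List Int :=
  mult_lista_go num1 num2 0

-- ===== PORT B =====
-- pad both lists to the max length with 1s, then one uniform elementwise product
def mult_lista_alt (num1 : List Int) (num2 : List Int) : List Int :=
  let n := max num1.length num2.length
  let p1 := num1 ++ List.replicate (n - num1.length) 1
  let p2 := num2 ++ List.replicate (n - num2.length) 1
  List.zipWith (· * ·) p1 p2

-- ===== PRECONDITION & SPEC =====
def Spec_mult_lista (num1 : List Int) (num2 : List Int) (out : List Int) : Prop := out = mult_lista_alt num1 num2
instance (num1 : List Int) (num2 : List Int) (out : List Int) : Decidable (Spec_mult_lista num1 num2 out) := by unfold Spec_mult_lista; infer_instance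

-- ===== CLAIM (what is proved, stated in full; the proofs are below) =====
def Claim_equal_mult_lista : Prop := ∀ (num1 : List Int) (num2 : List Int), Dom_mult_lista num1 num2 → Spec_mult_lista num1 num2 (mult_lista num1 num2)

-- ===== LEMMAS AND PROOFS =====

theorem mult_lista_go_eq (num1 num2 : List Int) (i : Nat) :
    mult_lista_go num1 num2 i =
      List.zipWith (· * ·) (num1.drop i) (num2.drop i) ++
        (num1.drop (max i (min num1.length num2.length)) ++
         num2.drop (max i (min num1.length num2.length))) := by
  fun_induction mult_lista_go num1 num2 i with
  | case1 i h ih =>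
    rw [ih]
    split_ifs with h1 h2
    · have hi1 : i < num1.length := by omega
      have hmax : max i (min num1.length num2.length) = i := by omega
      have hmax' : max (i+1) (min num1.length num2.length) = i + 1 := by omega
      rw [hmax, hmax']
      rw [List.drop_eq_nil_of_le (as := num2) (by omega),
          List.drop_eq_nil_of_le (as := num2) (by omega)]
      simp only [List.zipWith_nil_right, List.append_nil, List.nil_append]
      conv_rhs => rw [List.drop_eq_getElem_cons hi1]
      simp [List.getD_eq_getElem?_getD, List.getElem?_eq_getElem hi1]
    · have hi2 : i < num2.length := by omega
      have hmax : max i (min num1.length num2.length) = i := by omega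
      have hmax' : max (i+1) (min num1.length num2.length) = i + 1 := by omega
      rw [hmax, hmax']
      rw [List.drop_eq_nil_of_le (as := num1) (by omega),
          List.drop_eq_nil_of_le (as := num1) (by omega)]
      simp only [List.zipWith_nil_left, List.nil_append]
      conv_rhs => rw [List.drop_eq_getElem_cons hi2]
      simp [List.getD_eq_getElem?_getD, List.getElem?_eq_getElem hi2]
    · have hi1 : i < num1.length := by omega
      have hi2 : i < num2.length := by omega
      have hmax : max i (min num1.length num2.length) = min num1.length num2.length := by omega
      have hmax' : max (i+1) (min num1.length num2.length) = min num1.length num2.length := by omega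
      rw [hmax, hmax']
      conv_rhs => rw [List.drop_eq_getElem_cons hi1, List.drop_eq_getElem_cons hi2]
      rw [List.zipWith_cons_cons]
      simp [List.getD_eq_getElem?_getD, List.getElem?_eq_getElem hi1,
            List.getElem?_eq_getElem hi2]
  | case2 i h =>
    push Not at h
    rw [List.drop_eq_nil_of_le (as := num1) (by omega),
        List.drop_eq_nil_of_le (as := num2) (by omega),
        List.drop_eq_nil_of_le (as := num1) (by omega),
        List.drop_eq_nil_of_le (as := num2) (by omega)]
    simp

theorem zipWith_prefix_right {α β γ : Type} (f : α → β → γ) (l : List α) (m m' : List β)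
    (h : l.length ≤ m.length) : List.zipWith f l (m ++ m') = List.zipWith f l m := by
  induction l generalizing m with
  | nil => simp
  | cons x xs ih =>
    cases m with
    | nil => simp at h
    | cons y ys =>
      simp only [List.cons_append, List.zipWith_cons_cons, List.cons.injEq, true_and]
      exact ih ys (by simpa using h)

theorem zipWith_prefix_left {α β γ : Type} (f : α → β → γ) (l l' : List α) (m : List β)
    (h : m.length ≤ l.length) : List.zipWith f (l ++ l') m = List.zipWith f l m := by
  induction m generalizing l with
  | nil => simp
  | cons y ys ih =>
    cases l with
    | nil => simp at h
    | cons x xs =>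
      simp only [List.cons_append, List.zipWith_cons_cons, List.cons.injEq, true_and]
      exact ih xs (by simpa using h)

theorem zipWith_one_mul (l : List Int) :
    List.zipWith (· * ·) (List.replicate l.length (1 : Int)) l = l := by
  induction l with
  | nil => rfl
  | cons x xs ih => simp [List.replicate_succ, ih]

theorem zipWith_mul_one (l : List Int) :
    List.zipWith (· * ·) l (List.replicate l.length (1 : Int)) = l := by
  induction l with
  | nil => rfl
  | cons x xs ih => simp [List.replicate_succ, ih]

-- ===== VERDICT (by name: the statement is the Claim_ definition above) =====
theorem mult_lista_spec : Claim_equal_mult_lista := by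
  intro num1 num2 _
  unfold Spec_mult_lista mult_lista mult_lista_alt
  rw [mult_lista_go_eq]
  simp only [List.drop_zero, Nat.zero_max]
  rcases Nat.le_total num1.length num2.length with hle | hle
  · have hmin : min num1.length num2.length = num1.length := by omega
    have h1 : max num1.length num2.length - num1.length = num2.length - num1.length := by omega
    have h2 : max num1.length num2.length - num2.length = 0 := by omega
    rw [hmin, h1, h2, List.replicate_zero, List.append_nil,
        List.drop_eq_nil_of_le (as := num1) (le_refl _), List.nil_append]
    conv_rhs => rw [← List.take_append_drop num1.length num2]
    rw [List.zipWith_append (l₁ := num1) (l₂ := num2.take num1.length)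
          (by simp only [List.length_take]; omega)]
    have hlen : (List.take num1.length num2 ++ List.drop num1.length num2).length - num1.length
        = (List.drop num1.length num2).length := by simp
    rw [hlen, zipWith_one_mul]
    congr 1
    conv_lhs => rw [← List.take_append_drop num1.length num2]
    exact zipWith_prefix_right _ num1 _ _ (by simp; omega)
  · have hmin : min num1.length num2.length = num2.length := by omega
    have h1 : max num1.length num2.length - num2.length = num1.length - num2.length := by omega
    have h2 : max num1.length num2.length - num1.length = 0 := by omega
    rw [hmin, h1, h2, List.replicate_zero, List.append_nil,
        List.drop_eq_nil_of_le (as := num2) (le_refl _), List.append_nil]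
    conv_rhs => rw [← List.take_append_drop num2.length num1]
    rw [List.zipWith_append (l₁ := num1.take num2.length) (l₂ := num2)
          (by simp only [List.length_take]; omega)]
    have hlen : (List.take num2.length num1 ++ List.drop num2.length num1).length - num2.length
        = (List.drop num2.length num1).length := by simp
    rw [hlen, zipWith_mul_one]
    congr 1
    conv_lhs => rw [← List.take_append_drop num2.length num1]
    exact zipWith_prefix_left _ _ _ num2 (by simp; omega)
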